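-- pv_equiv track=rewrite | github.com/Jyothi3659/hackerrankproblems | formingamagicsquare.py | formingamagicsquare
-- ===== SOURCE A (Python) =====
-- def formingamagicsquare(s):
--     data = [
--             [[8, 1, 6], [3, 5, 7], [4, 9, 2]],
--             [[6, 1, 8], [7, 5, 3], [2, 9, 4]],
--             [[4, 9, 2], [3, 5, 7], [8, 1, 6]],
--             [[2, 9, 4], [7, 5, 3], [6, 1, 8]],
--             [[8, 3, 4], [1, 5, 9], [6, 7, 2]],
--             [[4, 3, 8], [9, 5, 1], [2, 7, 6]],
--             [[6, 7, 2], [1, 5, 9], [8, 3, 4]],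
--             [[2, 7, 6], [9, 5, 1], [4, 3, 8]],
--            ]
--     t = []
--     for i in data:
--         res = 0
--         for j, k in zip(i, s):
--             for x, y in zip(j, k):
--                 res += max([x, y]) - min([x, y])
--         t.append(res)
--     return min(t)
-- ===== SOURCE B (Python) =====
-- def formingamagicsquare(s):
--     # Constructive search: any 3x3 magic square of 1..9 has centre 5, and the
--     # whole square is determined by its top-left and top-middle cells via the
--     # line-sum equations; enumerate those two cells, build the square, keep it
--     # iff it uses each of 1..9 once, and track the minimum conversion cost.
--     best = None
--     for a in range(1, 10):
--         for b in range(1, 10):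
--             c = 15 - a - b
--             i = 10 - a
--             g = 10 - c
--             h = 10 - b
--             d = 15 - a - g
--             f = 15 - c - i
--             cells = [a, b, c, d, 5, f, g, h, i]
--             if sorted(cells) == list(range(1, 10)):
--                 sq = [[a, b, c], [d, 5, f], [g, h, i]]
--                 cost = sum(abs(x - y) for row, srow in zip(sq, s) for x, y in zip(row, srow))
--                 if best is None or cost < best:
--                     best = cost
--     return best
-- ===== Notes on version B (the rewrite author's own statement) =====
-- stated objective: alternative
-- what changed: B carries no table of magic squares: it searches constructively, enumerating the two free cells (top-left, top-middle) that determine a 3x3 magic square via the line-sum equations, building each candidate square, keeping it iff it uses 1..9 exactly once, and tracking the running minimum conversion cost; A instead scans a hardcoded list of the 8 squares and takes min() over collected costs.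
import Mathlib
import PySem

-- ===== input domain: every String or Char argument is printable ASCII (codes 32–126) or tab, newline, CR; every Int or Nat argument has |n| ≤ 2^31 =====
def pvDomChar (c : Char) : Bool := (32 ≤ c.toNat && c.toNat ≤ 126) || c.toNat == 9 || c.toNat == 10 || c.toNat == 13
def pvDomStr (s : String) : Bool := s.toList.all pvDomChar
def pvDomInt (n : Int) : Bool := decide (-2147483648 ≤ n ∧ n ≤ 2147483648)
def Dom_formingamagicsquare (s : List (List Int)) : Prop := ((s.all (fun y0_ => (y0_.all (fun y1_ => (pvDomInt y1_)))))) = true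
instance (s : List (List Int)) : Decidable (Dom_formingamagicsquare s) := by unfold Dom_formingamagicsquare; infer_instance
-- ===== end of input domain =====

-- B carries no table of magic squares: it enumerates the two free cells that determine a
-- 3x3 magic square via the line-sum equations, builds each candidate, keeps it iff it uses
-- 1..9 once, and tracks a running minimum cost; A scans a hardcoded list of the 8 squares
-- (objective: alternative; same asymptotic cost).

-- ===== PORT A =====
def formingamagicsquare (s : List (List Int)) : Int :=
  let data : List (List (List Int)) :=
    [ [[8, 1, 6], [3, 5, 7], [4, 9, 2]],
      [[6, 1, 8], [7, 5, 3], [2, 9, 4]],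
      [[4, 9, 2], [3, 5, 7], [8, 1, 6]],
      [[2, 9, 4], [7, 5, 3], [6, 1, 8]],
      [[8, 3, 4], [1, 5, 9], [6, 7, 2]],
      [[4, 3, 8], [9, 5, 1], [2, 7, 6]],
      [[6, 7, 2], [1, 5, 9], [8, 3, 4]],
      [[2, 7, 6], [9, 5, 1], [4, 3, 8]] ]
  let t : List Int := data.foldl (fun t i =>
    let res : Int := (i.zip s).foldl (fun res jk =>
      (jk.1.zip jk.2).foldl (fun res xy => res + (max xy.1 xy.2 - min xy.1 xy.2)) res) 0
    t ++ [res]) []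
  -- t always has exactly 8 elements, so min? is some; the getD 0 default is unreachable
  (PySem.List.min? t (fun y => y)).getD 0

-- ===== PORT B =====
-- the cost genexpr: sum(abs(x - y) for row, srow in zip(sq, s) for x, y in zip(row, srow))
def pvCostB (s sq : List (List Int)) : Int :=
  ((sq.zip s).flatMap (fun rs => (rs.1.zip rs.2).map (fun xy => |xy.1 - xy.2|))).sum

def formingamagicsquare_alt (s : List (List Int)) : Int :=
  let best : Option Int := (PySem.List.pyRange 1 10 1).foldl (fun best a =>
    (PySem.List.pyRange 1 10 1).foldl (fun best b =>
      let c := 15 - a - b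
      let i := 10 - a
      let g := 10 - c
      let h := 10 - b
      let d := 15 - a - g
      let f := 15 - c - i
      let cells : List Int := [a, b, c, d, 5, f, g, h, i]
      if PySem.List.sorted cells (fun y => y) false == PySem.List.pyRange 1 10 1 then
        let sq : List (List Int) := [[a, b, c], [d, 5, f], [g, h, i]]
        let cost := pvCostB s sq
        match best with
        | none => some cost
        | some bst => if cost < bst then some cost else some bst
      else best) best) none
  -- exactly 8 candidates pass the check, so best is some; the getD 0 default is unreachable
  best.getD 0

-- ===== PRECONDITION & SPEC =====
def Spec_formingamagicsquare (s : List (List Int)) (out : Int) : Prop := out = formingamagicsquare_alt s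
instance (s : List (List Int)) (out : Int) : Decidable (Spec_formingamagicsquare s out) := by unfold Spec_formingamagicsquare; infer_instance

-- ===== CLAIM =====
def Claim_equal_formingamagicsquare : Prop := ∀ (s : List (List Int)), Dom_formingamagicsquare s → Spec_formingamagicsquare s (formingamagicsquare s)

-- ===== LEMMAS AND PROOFS =====

-- A's innermost cell loop equals a sum of absolute differences
lemma pv_inner_eq (l : List (Int × Int)) (r : Int) :
    l.foldl (fun res xy => res + (max xy.1 xy.2 - min xy.1 xy.2)) r
      = r + (l.map (fun xy => |xy.1 - xy.2|)).sum := by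
  induction l generalizing r with
  | nil => simp
  | cons a t ih =>
      simp only [List.foldl_cons, List.map_cons, List.sum_cons]
      rw [ih, max_sub_min_eq_abs, abs_sub_comm, add_assoc]

-- A's row loop, with a generalized accumulator
lemma pv_outer_eq (l : List (List Int × List Int)) (r : Int) :
    l.foldl (fun res jk =>
        (jk.1.zip jk.2).foldl (fun res xy => res + (max xy.1 xy.2 - min xy.1 xy.2)) res) r
      = r + (l.flatMap (fun rs => (rs.1.zip rs.2).map (fun xy => |xy.1 - xy.2|))).sum := by
  induction l generalizing r with
  | nil => simp
  | cons a t ih =>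
      simp only [List.foldl_cons, List.flatMap_cons, List.sum_append]
      rw [pv_inner_eq, ih, add_assoc]

-- A's per-square cost loop equals B's cost function
lemma pv_cost_eq (s i : List (List Int)) :
    (i.zip s).foldl (fun res jk =>
        (jk.1.zip jk.2).foldl (fun res xy => res + (max xy.1 xy.2 - min xy.1 xy.2)) res) 0
      = pvCostB s i := by
  rw [pv_outer_eq]; simp [pvCostB]

-- B's running-minimum update, named for the proof
def pvUpdB (best : Option Int) (c : Int) : Option Int :=
  match best with
  | none => some c
  | some b => if c < b then some c else some b

lemma pvUpdB_none (c : Int) : pvUpdB none c = some c := rfl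

lemma pvUpdB_some (b c : Int) : pvUpdB (some b) c = some (min b c) := by
  simp only [pvUpdB]
  split_ifs with h <;> simp [min_def] <;> omega

-- B's per-pair body, phrased through the named helpers (definitional)
def pvChkB (p : Int × Int) : Bool :=
  PySem.List.sorted
    [p.1, p.2, 15 - p.1 - p.2, 15 - p.1 - (10 - (15 - p.1 - p.2)), 5,
     15 - (15 - p.1 - p.2) - (10 - p.1), 10 - (15 - p.1 - p.2), 10 - p.2, 10 - p.1]
    (fun y => y) false == PySem.List.pyRange 1 10 1

def pvSqB (p : Int × Int) : List (List Int) :=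
  [[p.1, p.2, 15 - p.1 - p.2],
   [15 - p.1 - (10 - (15 - p.1 - p.2)), 5, 15 - (15 - p.1 - p.2) - (10 - p.1)],
   [10 - (15 - p.1 - p.2), 10 - p.2, 10 - p.1]]

-- a nested fold over two lists is a fold over the pair list
lemma pv_pair_fold {α : Type} (l1 l2 : List Int) (g : α → Int × Int → α) (init : α) :
    l1.foldl (fun st a => l2.foldl (fun st b => g st (a, b)) st) init
      = (l1.flatMap (fun a => l2.map (fun b => (a, b)))).foldl g init := by
  induction l1 generalizing init with
  | nil => simp
  | cons a t ih => simp [List.foldl_append, List.foldl_map, ih]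

-- guarded fold = fold over the filtered-and-mapped list
lemma pv_filter_fold {α : Type} (L : List (Int × Int)) (chk : Int × Int → Bool)
    (bld : Int × Int → List (List Int)) (f : α → List (List Int) → α) (init : α) :
    L.foldl (fun st p => if chk p then f st (bld p) else st) init
      = ((L.filter chk).map bld).foldl f init := by
  induction L generalizing init with
  | nil => rfl
  | cons a t ih =>
      by_cases h : chk a = true <;> simp [h, ih]

set_option maxHeartbeats 2000000 in
theorem formingamagicsquare_spec : Claim_equal_formingamagicsquare := by
  intro s _
  show formingamagicsquare s = formingamagicsquare_alt s
  have hB : formingamagicsquare_alt s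
      = (((((PySem.List.pyRange 1 10 1).flatMap
            (fun a => (PySem.List.pyRange 1 10 1).map (fun b => (a, b)))).filter pvChkB).map
              pvSqB).foldl (fun best sq => pvUpdB best (pvCostB s sq)) none).getD 0 :=
    congrArg (fun o : Option Int => o.getD 0)
      (Eq.trans
        (pv_pair_fold (PySem.List.pyRange 1 10 1) (PySem.List.pyRange 1 10 1)
          (fun st p => if pvChkB p then pvUpdB st (pvCostB s (pvSqB p)) else st) none)
        (pv_filter_fold _ pvChkB pvSqB (fun st sq => pvUpdB st (pvCostB s sq)) none))
  rw [hB,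
    show ((((PySem.List.pyRange 1 10 1).flatMap
        (fun a => (PySem.List.pyRange 1 10 1).map (fun b => (a, b)))).filter pvChkB).map pvSqB)
      = [ [[2, 7, 6], [9, 5, 1], [4, 3, 8]],
          [[2, 9, 4], [7, 5, 3], [6, 1, 8]],
          [[4, 3, 8], [9, 5, 1], [2, 7, 6]],
          [[4, 9, 2], [3, 5, 7], [8, 1, 6]],
          [[6, 1, 8], [7, 5, 3], [2, 9, 4]],
          [[6, 7, 2], [1, 5, 9], [8, 3, 4]],
          [[8, 1, 6], [3, 5, 7], [4, 9, 2]],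
          [[8, 3, 4], [1, 5, 9], [6, 7, 2]] ] from by decide]
  simp only [formingamagicsquare, List.foldl_cons, List.foldl_nil,
    List.nil_append, List.cons_append, pv_cost_eq, pvUpdB_none, pvUpdB_some,
    PySem.List.min?_id_cons, Option.getD_some]
  generalize pvCostB s [[8, 1, 6], [3, 5, 7], [4, 9, 2]] = c1
  generalize pvCostB s [[6, 1, 8], [7, 5, 3], [2, 9, 4]] = c2
  generalize pvCostB s [[4, 9, 2], [3, 5, 7], [8, 1, 6]] = c3
  generalize pvCostB s [[2, 9, 4], [7, 5, 3], [6, 1, 8]] = c4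
  generalize pvCostB s [[8, 3, 4], [1, 5, 9], [6, 7, 2]] = c5
  generalize pvCostB s [[4, 3, 8], [9, 5, 1], [2, 7, 6]] = c6
  generalize pvCostB s [[6, 7, 2], [1, 5, 9], [8, 3, 4]] = c7
  generalize pvCostB s [[2, 7, 6], [9, 5, 1], [4, 3, 8]] = c8
  apply le_antisymm <;> simp only [le_min_iff, min_le_iff] <;> omega
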